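-- pv_equiv track=rewrite | github.com/gematik/fhir-igs-workflow | scripts/requirement-qa/check_error_code_consistency.py | resolve_ruleset_codes
-- ===== SOURCE A (Python) =====
-- from typing import Dict, Iterable, List, Optional, Set, Tuple
--
-- def resolve_ruleset_codes(
--     ruleset: str,
--     refs: Dict[str, List[str]],
--     base_error_codes: Dict[str, Set[str]],
--     seen: Optional[Set[str]] = None,
-- ) -> Set[str]:
--     if seen is None:
--         seen = set()
--     if ruleset in seen:
--         return set()
--     seen.add(ruleset)
--
--     out: Set[str] = set(base_error_codes.get(ruleset, set()))
--     for ref in refs.get(ruleset, []):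
--         out.update(base_error_codes.get(ref, set()))
--         if ref in refs:
--             out.update(resolve_ruleset_codes(ref, refs, base_error_codes, seen))
--     return out
-- ===== SOURCE B (Python) =====
-- def resolve_ruleset_codes(ruleset, refs, base_error_codes, seen=None):
--     if seen is None:
--         seen = set()
--     if ruleset in seen:
--         return set()
--     seen.add(ruleset)
--     out = set(base_error_codes.get(ruleset, set()))
--     stack = [iter(refs.get(ruleset, []))]
--     while stack:
--         ref = next(stack[-1], None)
--         if ref is None:
--             stack.pop()
--             continue
--         out.update(base_error_codes.get(ref, set()))
--         if ref in refs and ref not in seen: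
--             seen.add(ref)
--             stack.append(iter(refs.get(ref, [])))
--     return out
-- ===== Notes on version B (the rewrite author's own statement) =====
-- stated objective: alternative
-- what changed: Replaces A's recursive DFS over the refs graph with an explicit stack-of-iterators while-loop (iterative DFS) that maintains one global accumulator set instead of unioning per-call result sets.
import Mathlib
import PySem

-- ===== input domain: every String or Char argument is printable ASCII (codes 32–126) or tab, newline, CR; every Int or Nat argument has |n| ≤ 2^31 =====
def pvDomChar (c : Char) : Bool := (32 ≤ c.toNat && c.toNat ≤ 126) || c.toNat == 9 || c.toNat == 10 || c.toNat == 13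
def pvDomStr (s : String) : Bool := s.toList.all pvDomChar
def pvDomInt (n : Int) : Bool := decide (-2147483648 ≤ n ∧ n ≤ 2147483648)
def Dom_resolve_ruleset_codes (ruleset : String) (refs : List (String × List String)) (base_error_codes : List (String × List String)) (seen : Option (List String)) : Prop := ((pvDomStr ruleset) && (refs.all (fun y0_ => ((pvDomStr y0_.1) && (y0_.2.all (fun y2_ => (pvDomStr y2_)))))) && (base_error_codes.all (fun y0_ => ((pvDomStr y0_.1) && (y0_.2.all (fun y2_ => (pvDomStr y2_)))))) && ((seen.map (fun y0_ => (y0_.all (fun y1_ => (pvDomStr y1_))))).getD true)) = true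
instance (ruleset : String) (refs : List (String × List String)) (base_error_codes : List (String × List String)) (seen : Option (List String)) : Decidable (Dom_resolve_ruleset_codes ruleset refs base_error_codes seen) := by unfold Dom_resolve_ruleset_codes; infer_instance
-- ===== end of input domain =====

-- ===== PORT A =====
-- B rewrites A's recursive DFS as an explicit stack-based (iterative) DFS: same return value
-- and the same final mutation of `seen` (the equivalence proved here is about the return value).
-- Both ports: dict lookups on the association lists via PySem.Dict (first match).
def rrcGetD (d : List (String × List String)) (k : String) : List String :=
  (PySem.Dict.mk d).getD k []

def rrcHasKey (d : List (String × List String)) (k : String) : Bool :=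
  (PySem.Dict.mk d).contains k

-- A's recursion, transliterated; `fuel` is a totality guard only (one unit per Python call):
-- each nested call marks a fresh refs key as seen, so `refs.length + 2` always suffices.
mutual
def raGo (fuel : Nat) (ruleset : String) (refs base_error_codes : List (String × List String))
    (seen : PySem.Set String) : PySem.Set String × PySem.Set String :=
  match fuel with
  | 0 => ([], seen)          -- unreachable with the fuel used below
  | fuel + 1 =>
    if PySem.Set.contains seen ruleset then ([], seen)
    else
      let seen1 := PySem.Set.add seen ruleset
      let out0 := PySem.Set.ofList (rrcGetD base_error_codes ruleset)
      raRefs fuel (rrcGetD refs ruleset) refs base_error_codes out0 seen1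
termination_by (fuel, 0)

def raRefs (fuel : Nat) (rs : List String) (refs base_error_codes : List (String × List String))
    (out seen : PySem.Set String) : PySem.Set String × PySem.Set String :=
  match rs with
  | [] => (out, seen)
  | r :: rest =>
    let out1 := PySem.Set.update out (rrcGetD base_error_codes r)
    if rrcHasKey refs r then
      let p := raGo fuel r refs base_error_codes seen
      raRefs fuel rest refs base_error_codes (PySem.Set.update out1 p.1) p.2
    else
      raRefs fuel rest refs base_error_codes out1 seen
termination_by (fuel, rs.length + 1)
end

def resolve_ruleset_codes (ruleset : String) (refs : List (String × List String)) (base_error_codes : List (String × List String)) (seen : Option (List String)) : List String :=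
  let seen0 := seen.getD []
  (raGo (refs.length + 2) ruleset refs base_error_codes seen0).1

-- ===== PORT B =====
-- fuel bound for B's while-loop (totality guard only): every iteration strictly decreases
-- Φ = Σ|frames| + #frames + (#unseen refs keys)·(Σ|refs values| + |refs| + 1).
def rbC (refs : List (String × List String)) : Nat :=
  (refs.map (fun p => p.2.length)).sum + refs.length + 1

def rbM (refs : List (String × List String)) (seen : PySem.Set String) : Nat :=
  (refs.map Prod.fst).countP (fun k => !(PySem.Set.contains seen k))

def rbPhi (frames : List (List String)) (refs : List (String × List String))
    (seen : PySem.Set String) : Nat :=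
  (frames.map List.length).sum + frames.length + rbM refs seen * rbC refs

-- the while-loop of Source B: `stack` holds the not-yet-exhausted iterators (head = stack top)
def rbLoop (fuel : Nat) (stack : List (List String))
    (refs base_error_codes : List (String × List String))
    (out seen : PySem.Set String) : PySem.Set String × PySem.Set String :=
  match fuel with
  | 0 => (out, seen)         -- unreachable with the fuel used below
  | fuel + 1 =>
    match stack with
    | [] => (out, seen)
    | frame :: rest =>
      match frame with
      | [] => rbLoop fuel rest refs base_error_codes out seen
      | ref :: frame' =>
        let out1 := PySem.Set.update out (rrcGetD base_error_codes ref)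
        if rrcHasKey refs ref && !(PySem.Set.contains seen ref) then
          rbLoop fuel (rrcGetD refs ref :: frame' :: rest) refs base_error_codes out1
            (PySem.Set.add seen ref)
        else
          rbLoop fuel (frame' :: rest) refs base_error_codes out1 seen

def resolve_ruleset_codes_alt (ruleset : String) (refs : List (String × List String)) (base_error_codes : List (String × List String)) (seen : Option (List String)) : List String :=
  let seen0 := seen.getD []
  if PySem.Set.contains seen0 ruleset then []
  else
    let seen1 := PySem.Set.add seen0 ruleset
    let out0 := PySem.Set.ofList (rrcGetD base_error_codes ruleset)
    let frame0 := rrcGetD refs ruleset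
    (rbLoop (rbPhi [frame0] refs seen1 + 1) [frame0] refs base_error_codes out0 seen1).1

-- ===== PRECONDITION & SPEC =====
def Spec_resolve_ruleset_codes (ruleset : String) (refs : List (String × List String)) (base_error_codes : List (String × List String)) (seen : Option (List String)) (out : List String) : Prop := out = resolve_ruleset_codes_alt ruleset refs base_error_codes seen
instance (ruleset : String) (refs : List (String × List String)) (base_error_codes : List (String × List String)) (seen : Option (List String)) (out : List String) : Decidable (Spec_resolve_ruleset_codes ruleset refs base_error_codes seen out) := by unfold Spec_resolve_ruleset_codes; infer_instance

-- ===== CLAIM (what is proved, stated in full; the proofs are below) =====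
def Claim_equal_resolve_ruleset_codes : Prop := ∀ (ruleset : String) (refs : List (String × List String)) (base_error_codes : List (String × List String)) (seen : Option (List String)), Dom_resolve_ruleset_codes ruleset refs base_error_codes seen → Spec_resolve_ruleset_codes ruleset refs base_error_codes seen (resolve_ruleset_codes ruleset refs base_error_codes seen)

-- ===== LEMMAS AND PROOFS =====

-- Set.update algebra
theorem rrc_upd_add (z b : PySem.Set String) (x : String) :
    PySem.Set.update z (PySem.Set.add b x) = PySem.Set.add (PySem.Set.update z b) x := by
  by_cases hx : x ∈ b
  · rw [PySem.Set.add_of_mem hx, PySem.Set.add_of_mem ((PySem.Set.mem_update _ _ _).2 (Or.inr hx))]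
  · rw [PySem.Set.add_of_not_mem hx, PySem.Set.update_append, PySem.Set.update_cons,
      PySem.Set.update_nil]

theorem rrc_upd_upd (z b : PySem.Set String) (c : List String) :
    PySem.Set.update z (PySem.Set.update b c) = PySem.Set.update (PySem.Set.update z b) c := by
  induction c generalizing b with
  | nil => rw [PySem.Set.update_nil, PySem.Set.update_nil]
  | cons x c ih =>
    rw [PySem.Set.update_cons b, ih (PySem.Set.add b x), rrc_upd_add,
      PySem.Set.update_cons (PySem.Set.update z b)]

theorem rrc_upd_of_subset (z : PySem.Set String) (b : List String) (h : ∀ x ∈ b, x ∈ z) :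
    PySem.Set.update z b = z := by
  induction b with
  | nil => exact PySem.Set.update_nil z
  | cons x b ih =>
    rw [PySem.Set.update_cons, PySem.Set.add_of_mem (h x (List.mem_cons_self ..))]
    exact ih fun y hy => h y (List.mem_cons_of_mem _ hy)

theorem rrc_upd_ofList (z : PySem.Set String) (c : List String) :
    PySem.Set.update z (PySem.Set.ofList c) = PySem.Set.update z c := by
  rw [← PySem.Set.update_nil_left, rrc_upd_upd, PySem.Set.update_nil]

-- counting unseen keys
theorem rrc_m_anti (refs : List (String × List String)) (s t : PySem.Set String)
    (h : ∀ x ∈ s, x ∈ t) : rbM refs t ≤ rbM refs s := by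
  unfold rbM
  refine List.countP_mono_left fun k _ hk => ?_
  simp only [Bool.not_eq_eq_eq_not, Bool.not_true] at hk ⊢
  cases hks : PySem.Set.contains s k
  · rfl
  · rw [(PySem.Set.contains_iff t k).2 (h k ((PySem.Set.contains_iff s k).1 hks))] at hk
    exact absurd hk (by decide)

theorem rrc_countP_lt (p q : String → Bool) (himp : ∀ x, p x = true → q x = true)
    (r : String) (hp : p r = false) (hq : q r = true) :
    ∀ l : List String, r ∈ l → l.countP p < l.countP q := by
  intro l hr
  induction l with
  | nil => simp at hr
  | cons a l ih =>
    rw [List.countP_cons, List.countP_cons]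
    rcases List.mem_cons.1 hr with rfl | hrl
    · have hle : l.countP p ≤ l.countP q := List.countP_mono_left fun x _ => himp x
      rw [hp, hq]
      simp only [Bool.false_eq_true, if_false, if_true]
      omega
    · have hstep := ih hrl
      cases hpa : p a
      · simp only [Bool.false_eq_true, if_false]
        have : (if q a = true then 1 else 0) + l.countP q = l.countP q + if q a = true then 1 else 0 := by omega
        split_ifs <;> omega
      · rw [himp a hpa]
        simp only [if_true]
        omega

theorem rrc_m_lt (refs : List (String × List String)) (seen : PySem.Set String) (r : String)
    (hk : rrcHasKey refs r = true) (hs : PySem.Set.contains seen r = false) :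
    rbM refs (PySem.Set.add seen r) < rbM refs seen := by
  have hrk : r ∈ refs.map Prod.fst := by
    have h1 := (PySem.Dict.contains_iff_mem_keys (PySem.Dict.mk refs) r).1 hk
    simpa [PySem.Dict.keys, PySem.Dict.items] using h1
  unfold rbM
  refine rrc_countP_lt _ _ (fun x hx => ?_) r ?_ ?_ _ hrk
  · -- p x = true → q x = true
    cases hxs : PySem.Set.contains seen x
    · rfl
    · rw [(PySem.Set.contains_iff (PySem.Set.add seen r) x).2
        ((PySem.Set.mem_add _ _ _).2 (Or.inl ((PySem.Set.contains_iff seen x).1 hxs)))] at hx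
      exact absurd hx (by decide)
  · rw [(PySem.Set.contains_iff (PySem.Set.add seen r) r).2
      ((PySem.Set.mem_add _ _ _).2 (Or.inr rfl))]
    rfl
  · rw [hs]; rfl

theorem rrc_m_le (refs : List (String × List String)) (seen : PySem.Set String) :
    rbM refs seen ≤ refs.length := by
  unfold rbM
  calc (refs.map Prod.fst).countP _ ≤ (refs.map Prod.fst).length := List.countP_le_length
    _ = refs.length := List.length_map ..

theorem rrc_getD_len_le (d : List (String × List String)) (k : String) :
    (rrcGetD d k).length ≤ (d.map (fun p => p.2.length)).sum := by
  unfold rrcGetD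
  induction d with
  | nil => simp [PySem.Dict.getD, PySem.Dict.get?]
  | cons p rest ih =>
    rw [PySem.Dict.getD_eq_get?_getD]
    rcases p with ⟨k', v⟩
    rw [PySem.Dict.get?_mk_cons]
    by_cases hk : (k' == k)
    · simp only [if_pos hk, Option.getD_some, List.map_cons, List.sum_cons]
      omega
    · rw [if_neg hk, ← PySem.Dict.getD_eq_get?_getD]
      simp only [List.map_cons, List.sum_cons]
      omega

theorem rrc_getD_not_contains (d : List (String × List String)) (k : String)
    (h : rrcHasKey d k = false) : rrcGetD d k = [] := by
  unfold rrcHasKey at h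
  unfold rrcGetD
  exact PySem.Dict.getD_of_not_contains _ _ h

-- seen only grows through A's recursion
theorem raMono (refs bec : List (String × List String)) : ∀ fuel : Nat,
    (∀ r seen, ∀ x ∈ seen, x ∈ (raGo fuel r refs bec seen).2) ∧
    (∀ rs out seen, ∀ x ∈ seen, x ∈ (raRefs fuel rs refs bec out seen).2) := by
  intro fuel
  induction fuel with
  | zero =>
    have hgo : ∀ r seen, ∀ x ∈ seen, x ∈ (raGo 0 r refs bec seen).2 := by
      intro r seen x hx; simpa [raGo] using hx
    refine ⟨hgo, ?_⟩
    intro rs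
    induction rs with
    | nil => intro out seen x hx; simpa [raRefs] using hx
    | cons r rest ih =>
      intro out seen x hx
      simp only [raRefs]
      by_cases hk : rrcHasKey refs r = true
      · rw [if_pos hk]
        exact ih _ _ x (hgo r seen x hx)
      · rw [if_neg hk]
        exact ih _ _ x hx
  | succ f ihf =>
    have hgo : ∀ r seen, ∀ x ∈ seen, x ∈ (raGo (f + 1) r refs bec seen).2 := by
      intro r seen x hx
      simp only [raGo]
      by_cases hm : PySem.Set.contains seen r = true
      · rw [if_pos hm]
        exact hx
      · rw [if_neg hm]
        exact ihf.2 _ _ _ x ((PySem.Set.mem_add _ _ _).2 (Or.inl hx))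
    refine ⟨hgo, ?_⟩
    intro rs
    induction rs with
    | nil => intro out seen x hx; simpa [raRefs] using hx
    | cons r rest ih =>
      intro out seen x hx
      simp only [raRefs]
      by_cases hk : rrcHasKey refs r = true
      · rw [if_pos hk]
        exact ih _ _ x (hgo r seen x hx)
      · rw [if_neg hk]
        exact ih _ _ x hx

-- fuel irrelevance beyond rbM + 1
theorem raStep (refs bec : List (String × List String)) : ∀ fuel : Nat,
    (∀ r seen, rbM refs seen + 1 ≤ fuel →
      raGo (fuel + 1) r refs bec seen = raGo fuel r refs bec seen) ∧
    (∀ rs out seen, rbM refs seen + 1 ≤ fuel →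
      raRefs (fuel + 1) rs refs bec out seen = raRefs fuel rs refs bec out seen) := by
  intro fuel
  induction fuel with
  | zero => exact ⟨fun r seen h => absurd h (by omega), fun rs out seen h => absurd h (by omega)⟩
  | succ f ihf =>
    have hgo : ∀ r seen, rbM refs seen + 1 ≤ f + 1 →
        raGo (f + 1 + 1) r refs bec seen = raGo (f + 1) r refs bec seen := by
      intro r seen hle
      simp only [raGo]
      by_cases hm : PySem.Set.contains seen r = true
      · rw [if_pos hm, if_pos hm]
      · rw [if_neg hm, if_neg hm]
        by_cases hk : rrcHasKey refs r = true
        · apply ihf.2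
          have hlt := rrc_m_lt refs seen r hk (by
            cases h' : PySem.Set.contains seen r
            · rfl
            · exact absurd h' hm)
          omega
        · rw [rrc_getD_not_contains refs r (by
            cases h' : rrcHasKey refs r
            · rfl
            · exact absurd h' hk)]
          simp [raRefs]
    refine ⟨hgo, ?_⟩
    intro rs
    induction rs with
    | nil => intro out seen _; simp [raRefs]
    | cons r rest ih =>
      intro out seen hle
      simp only [raRefs]
      by_cases hk : rrcHasKey refs r = true
      · rw [if_pos hk, if_pos hk, hgo r seen hle]
        refine ih _ _ ?_
        have hmono := (raMono refs bec (f + 1)).1 r seen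
        have := rrc_m_anti refs seen _ hmono
        omega
      · rw [if_neg hk, if_neg hk]
        exact ih _ _ hle

theorem raRefsEq (refs bec : List (String × List String)) (fa fb : Nat) (rs : List String)
    (out seen : PySem.Set String) (ha : rbM refs seen + 1 ≤ fa) (hb : rbM refs seen + 1 ≤ fb) :
    raRefs fa rs refs bec out seen = raRefs fb rs refs bec out seen := by
  have base : ∀ fc, rbM refs seen + 1 ≤ fc →
      raRefs fc rs refs bec out seen = raRefs (rbM refs seen + 1) rs refs bec out seen := by
    intro fc hc
    induction fc, hc using Nat.le_induction with
    | base => rfl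
    | succ n hn ihn => rw [(raStep refs bec n).2 rs out seen hn, ihn]
  rw [base fa ha, base fb hb]

-- `out` is a pure accumulator of raRefs
theorem raRefs_acc (refs bec : List (String × List String)) (fuel : Nat) :
    ∀ (rs : List String) (out seen : PySem.Set String),
    raRefs fuel rs refs bec out seen =
      (PySem.Set.update out (raRefs fuel rs refs bec [] seen).1,
       (raRefs fuel rs refs bec [] seen).2) := by
  intro rs
  induction rs with
  | nil => intro out seen; simp [raRefs, PySem.Set.update_nil]
  | cons r rest ih =>
    intro out seen
    simp only [raRefs]
    by_cases hk : rrcHasKey refs r = true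
    · rw [if_pos hk, if_pos hk]
      rw [ih (PySem.Set.update (PySem.Set.update out (rrcGetD bec r))
            (raGo fuel r refs bec seen).1) (raGo fuel r refs bec seen).2,
          ih (PySem.Set.update (PySem.Set.update [] (rrcGetD bec r))
            (raGo fuel r refs bec seen).1) (raGo fuel r refs bec seen).2]
      refine Prod.ext ?_ rfl
      show PySem.Set.update (PySem.Set.update (PySem.Set.update out (rrcGetD bec r))
          (raGo fuel r refs bec seen).1) _ =
        PySem.Set.update out (PySem.Set.update (PySem.Set.update (PySem.Set.update []
          (rrcGetD bec r)) (raGo fuel r refs bec seen).1) _)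
      rw [rrc_upd_upd, rrc_upd_upd, rrc_upd_upd, PySem.Set.update_nil]
    · rw [if_neg hk, if_neg hk]
      rw [ih (PySem.Set.update out (rrcGetD bec r)) seen,
          ih (PySem.Set.update [] (rrcGetD bec r)) seen]
      refine Prod.ext ?_ rfl
      show PySem.Set.update (PySem.Set.update out (rrcGetD bec r)) _ =
        PySem.Set.update out (PySem.Set.update (PySem.Set.update [] (rrcGetD bec r)) _)
      rw [rrc_upd_upd, rrc_upd_upd, PySem.Set.update_nil]

-- the frame stack of B = the pending raRefs calls of A, processed in order
def chain (fa : Nat) (frames : List (List String))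
    (refs bec : List (String × List String))
    (out seen : PySem.Set String) : PySem.Set String × PySem.Set String :=
  match frames with
  | [] => (out, seen)
  | f :: fs =>
    let p := raRefs fa f refs bec out seen
    chain fa fs refs bec p.1 p.2

theorem rrc_sim (refs bec : List (String × List String)) (fa : Nat) : ∀ (fb : Nat)
    (frames : List (List String)) (out seen : PySem.Set String),
    rbPhi frames refs seen < fb → rbM refs seen + 1 ≤ fa →
    rbLoop fb frames refs bec out seen = chain fa frames refs bec out seen := by
  intro fb
  induction fb with
  | zero => intro frames out seen h _; exact absurd h (by omega)
  | succ fb ih =>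
    intro frames out seen hPhi hfa
    cases frames with
    | nil => simp [rbLoop, chain]
    | cons frame rest =>
      cases frame with
      | nil =>
        have hstep : rbLoop (fb + 1) ([] :: rest) refs bec out seen =
            rbLoop fb rest refs bec out seen := by simp [rbLoop]
        rw [hstep, ih rest out seen (by
          unfold rbPhi at hPhi ⊢
          simp only [List.map_cons, List.sum_cons, List.length_cons] at hPhi
          omega) hfa]
        simp [chain, raRefs]
      | cons r frame' =>
        simp only [rbLoop]
        by_cases hc : (rrcHasKey refs r && !(PySem.Set.contains seen r)) = true
        · rw [if_pos hc]
          have hc' := hc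
          rw [Bool.and_eq_true] at hc'
          have hk : rrcHasKey refs r = true := hc'.1
          have hns : PySem.Set.contains seen r = false := by
            have := hc'.2
            cases h' : PySem.Set.contains seen r
            · rfl
            · rw [h'] at this; exact absurd this (by decide)
          have hmlt := rrc_m_lt refs seen r hk hns
          have hPhi' : rbPhi (rrcGetD refs r :: frame' :: rest) refs
              (PySem.Set.add seen r) < fb := by
            have hlen := rrc_getD_len_le refs r
            have hmul : (rbM refs (PySem.Set.add seen r) + 1) * rbC refs ≤
                rbM refs seen * rbC refs := Nat.mul_le_mul_right _ hmlt
            rw [Nat.succ_mul] at hmul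
            unfold rbPhi at hPhi ⊢
            unfold rbC at hmul hPhi ⊢
            simp only [List.map_cons, List.sum_cons, List.length_cons] at hPhi ⊢
            omega
          have hfa' : rbM refs (PySem.Set.add seen r) + 1 ≤ fa := by omega
          rw [ih _ _ _ hPhi' hfa']
          -- both sides are chains; equate the pending-call states
          obtain ⟨fa', rfl⟩ : ∃ fa', fa = fa' + 1 :=
            ⟨fa - 1, by omega⟩
          have hgo : raGo (fa' + 1) r refs bec seen =
              raRefs fa' (rrcGetD refs r) refs bec
                (PySem.Set.ofList (rrcGetD bec r)) (PySem.Set.add seen r) := by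
            simp only [raGo]
            rw [if_neg (by rw [hns]; exact fun h => absurd h (by decide))]
          have hfi : raRefs fa' (rrcGetD refs r) refs bec
                (PySem.Set.ofList (rrcGetD bec r)) (PySem.Set.add seen r) =
              raRefs (fa' + 1) (rrcGetD refs r) refs bec
                (PySem.Set.ofList (rrcGetD bec r)) (PySem.Set.add seen r) :=
            raRefsEq refs bec fa' (fa' + 1) _ _ _ (by omega) (by omega)
          -- unfold the RHS chain one step
          show chain (fa' + 1) (rrcGetD refs r :: frame' :: rest) refs bec
              (PySem.Set.update out (rrcGetD bec r)) (PySem.Set.add seen r) =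
            chain (fa' + 1) ((r :: frame') :: rest) refs bec out seen
          simp only [chain, raRefs]
          rw [if_pos hk, hgo, hfi]
          rw [raRefs_acc refs bec (fa' + 1) (rrcGetD refs r)
              (PySem.Set.update out (rrcGetD bec r)) (PySem.Set.add seen r),
            raRefs_acc refs bec (fa' + 1) (rrcGetD refs r)
              (PySem.Set.ofList (rrcGetD bec r)) (PySem.Set.add seen r)]
          have habs : PySem.Set.update (PySem.Set.update out (rrcGetD bec r))
              (PySem.Set.update (PySem.Set.ofList (rrcGetD bec r))
                (raRefs (fa' + 1) (rrcGetD refs r) refs bec [] (PySem.Set.add seen r)).1) =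
              PySem.Set.update (PySem.Set.update out (rrcGetD bec r))
                (raRefs (fa' + 1) (rrcGetD refs r) refs bec [] (PySem.Set.add seen r)).1 := by
            rw [rrc_upd_upd, rrc_upd_ofList,
              rrc_upd_of_subset (PySem.Set.update out (rrcGetD bec r)) (rrcGetD bec r)
                (fun x hx => (PySem.Set.mem_update _ _ _).2 (Or.inr hx))]
          rw [habs]
        · rw [if_neg hc]
          rw [ih (frame' :: rest) (PySem.Set.update out (rrcGetD bec r)) seen (by
            unfold rbPhi at hPhi ⊢
            simp only [List.map_cons, List.sum_cons, List.length_cons] at hPhi ⊢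
            omega) hfa]
          obtain ⟨fa', rfl⟩ : ∃ fa', fa = fa' + 1 := ⟨fa - 1, by omega⟩
          simp only [chain, raRefs]
          by_cases hk : rrcHasKey refs r = true
          · have hsr : PySem.Set.contains seen r = true := by
              cases h' : PySem.Set.contains seen r
              · rw [hk, h'] at hc; exact absurd rfl hc
              · rfl
            rw [if_pos hk]
            have hp : raGo (fa' + 1) r refs bec seen = ([], seen) := by
              simp only [raGo]; rw [if_pos hsr]
            rw [hp]
            simp only [PySem.Set.update_nil]
          · rw [if_neg hk]

-- ===== VERDICT (by name: the statement is the Claim_ definition above) =====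
theorem resolve_ruleset_codes_spec : Claim_equal_resolve_ruleset_codes := by
  intro ruleset refs bec seen _
  unfold Spec_resolve_ruleset_codes resolve_ruleset_codes resolve_ruleset_codes_alt
  simp only []
  by_cases hm : PySem.Set.contains (seen.getD []) ruleset = true
  · rw [if_pos hm]
    have hA : raGo (refs.length + 2) ruleset refs bec (seen.getD []) = ([], seen.getD []) := by
      show raGo (refs.length + 1 + 1) ruleset refs bec (seen.getD []) = ([], seen.getD [])
      simp only [raGo]
      rw [if_pos hm]
    rw [hA]
  · rw [if_neg hm]
    have hA : raGo (refs.length + 2) ruleset refs bec (seen.getD []) =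
        raRefs (refs.length + 1) (rrcGetD refs ruleset) refs bec
          (PySem.Set.ofList (rrcGetD bec ruleset))
          (PySem.Set.add (seen.getD []) ruleset) := by
      show raGo (refs.length + 1 + 1) ruleset refs bec (seen.getD []) = _
      simp only [raGo]
      rw [if_neg hm]
    rw [hA]
    rw [rrc_sim refs bec (refs.length + 1)
      (rbPhi [rrcGetD refs ruleset] refs (PySem.Set.add (seen.getD []) ruleset) + 1)
      [rrcGetD refs ruleset]
      (PySem.Set.ofList (rrcGetD bec ruleset))
      (PySem.Set.add (seen.getD []) ruleset)
      (by omega)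
      (by have := rrc_m_le refs (PySem.Set.add (seen.getD []) ruleset); omega)]
    simp only [chain]
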